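-- pv_equiv track=rewrite | github.com/nicoresni/Programa-Japones | Programa Japones/procesamiento.py | palabras_por_unidad
-- ===== SOURCE A (Python) =====
-- def palabras_por_unidad(diccionario):
--     """
--     DICCIONARIO DE PALABRAS POR UNIDAD
--     """
--     diccionario_unidad= {}
--     for palabra,info in diccionario.items():
--         unidad = info["unidad"]
--         if unidad in diccionario_unidad:
--             diccionario_unidad[unidad].append(palabra)
--         else:
--             diccionario_unidad[unidad] = [palabra]
--     return diccionario_unidad
-- ===== SOURCE B (Python) =====
-- def palabras_por_unidad(diccionario):
--     """
--     DICCIONARIO DE PALABRAS POR UNIDAD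
--     """
--     unidades = []
--     for info in diccionario.values():
--         u = info["unidad"]
--         if u not in unidades:
--             unidades.append(u)
--     return {u: [palabra for palabra, info in diccionario.items()
--                 if info["unidad"] == u]
--             for u in unidades}
-- ===== Notes on version B (the rewrite author's own statement) =====
-- stated objective: alternative
-- what changed: Replaces the single incremental dict-building pass (membership test then append-or-create per word) with a two-phase algorithm: first an ordered de-dup pass collecting the distinct units in first-appearance order, then a dict comprehension that filters the whole dictionary once per unit.
import Mathlib
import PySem

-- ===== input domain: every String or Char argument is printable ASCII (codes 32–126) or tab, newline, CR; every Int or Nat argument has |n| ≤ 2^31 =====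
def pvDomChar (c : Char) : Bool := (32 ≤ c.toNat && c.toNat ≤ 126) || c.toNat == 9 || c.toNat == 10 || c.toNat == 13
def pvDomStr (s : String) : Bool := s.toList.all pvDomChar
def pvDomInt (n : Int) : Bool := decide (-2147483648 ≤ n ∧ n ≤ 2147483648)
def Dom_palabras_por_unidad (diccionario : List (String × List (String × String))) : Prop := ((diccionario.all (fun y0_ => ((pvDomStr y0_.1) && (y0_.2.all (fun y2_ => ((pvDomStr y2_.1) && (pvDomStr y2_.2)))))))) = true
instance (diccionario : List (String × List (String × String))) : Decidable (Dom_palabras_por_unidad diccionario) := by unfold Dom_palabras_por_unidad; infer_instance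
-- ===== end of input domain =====

-- B groups in two phases (ordered list of distinct units, then one filtering scan per unit)
-- instead of A's single incremental dict-building pass; same result, different algorithm (not faster).

-- info["unidad"] (first-match lookup in the inner association list); the "" default is never
-- reached under Pre_, which requires every inner dict to carry the key "unidad" (Python raises KeyError otherwise).
def pvUnidad (info : List (String × String)) : String :=
  ((PySem.Dict.mk info).get? "unidad").getD ""

-- ===== PORT A =====
def palabras_por_unidad (diccionario : List (String × List (String × String))) : List (String × List String) :=
  (diccionario.foldl
    (fun (d : PySem.Dict String (List String)) pi =>
      let unidad := pvUnidad pi.2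
      if d.contains unidad then d.modify unidad [] (fun l => l ++ [pi.1])
      else d.insert unidad [pi.1])
    PySem.Dict.empty).items

-- ===== PORT B =====
def palabras_por_unidad_alt (diccionario : List (String × List (String × String))) : List (String × List String) :=
  let unidades : List String :=
    diccionario.foldl (fun (us : List String) pi => PySem.Set.add us (pvUnidad pi.2)) []
  unidades.map (fun u =>
    (u, (diccionario.filter (fun pi => pvUnidad pi.2 == u)).map (fun pi => pi.1)))

-- ===== PRECONDITION & SPEC =====
-- Pre_ excludes exactly the inputs where some word's info dict lacks the key "unidad": there Python A raises KeyError.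
def Pre_palabras_por_unidad (diccionario : List (String × List (String × String))) : Prop :=
  (diccionario.all (fun pi => pi.2.any (fun kv => kv.1 == "unidad"))) = true
instance (diccionario : List (String × List (String × String))) : Decidable (Pre_palabras_por_unidad diccionario) := by unfold Pre_palabras_por_unidad; infer_instance

def pvWitness_palabras_por_unidad : (List (String × List (String × String))) :=
  [("ka", [("unidad", "1")]), ("kb", [("unidad", "2")]), ("kc", [("unidad", "1")])]

def Spec_palabras_por_unidad (diccionario : List (String × List (String × String))) (out : List (String × List String)) : Prop := out = palabras_por_unidad_alt diccionario
instance (diccionario : List (String × List (String × String))) (out : List (String × List String)) : Decidable (Spec_palabras_por_unidad diccionario out) := by unfold Spec_palabras_por_unidad; infer_instance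

-- ===== CLAIM (what is proved, stated in full; the proofs are below) =====
def Claim_equal_palabras_por_unidad : Prop := ∀ (diccionario : List (String × List (String × String))), Dom_palabras_por_unidad diccionario → Pre_palabras_por_unidad diccionario → Spec_palabras_por_unidad diccionario (palabras_por_unidad diccionario)

-- ===== LEMMAS AND PROOFS =====

-- A's per-word branch (append if present, create otherwise) is exactly Dict.modify.
theorem pv_step_eq_modify (d : PySem.Dict String (List String)) (pi : String × List (String × String)) :
    (if d.contains (pvUnidad pi.2) then d.modify (pvUnidad pi.2) [] (fun l => l ++ [pi.1])
     else d.insert (pvUnidad pi.2) [pi.1])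
    = d.modify (pvUnidad pi.2) [] (fun l => l ++ [pi.1]) := by
  by_cases h : d.contains (pvUnidad pi.2)
  · simp [h]
  · simp only [Bool.not_eq_true] at h
    simp [h, PySem.Dict.modify, PySem.Dict.getD_of_not_contains d [] h]

theorem palabras_por_unidad_eq (diccionario : List (String × List (String × String))) :
    palabras_por_unidad diccionario = palabras_por_unidad_alt diccionario := by
  unfold palabras_por_unidad palabras_por_unidad_alt
  have hstep : (fun (d : PySem.Dict String (List String)) (pi : String × List (String × String)) =>
      let unidad := pvUnidad pi.2
      if d.contains unidad then d.modify unidad [] (fun l => l ++ [pi.1])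
      else d.insert unidad [pi.1])
      = fun d pi => d.modify (pvUnidad pi.2) [] (fun l => l ++ [pi.1]) := by
    funext d pi; exact pv_step_eq_modify d pi
  rw [hstep]
  have hfm : diccionario.foldl
        (fun (d : PySem.Dict String (List String)) pi => d.modify (pvUnidad pi.2) [] (fun l => l ++ [pi.1]))
        PySem.Dict.empty
      = (diccionario.map (fun pi => (pvUnidad pi.2, pi.1))).foldl
        (fun d p => d.modify p.1 [] (fun l => l ++ [p.2])) PySem.Dict.empty := by
    rw [List.foldl_map]
  rw [hfm]
  set l' := diccionario.map (fun pi => (pvUnidad pi.2, pi.1)) with hl'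
  have hnd : (l'.foldl (fun d p => d.modify p.1 [] (fun l => l ++ [p.2])) PySem.Dict.empty).keys.Nodup :=
    PySem.Dict.nodup_keys_foldl_modify_key l' (fun p => p.1) [] (fun _ p l => l ++ [p.2])
      PySem.Dict.empty (by simp [PySem.Dict.keys_empty])
  rw [PySem.Dict.items_eq_map_keys _ hnd []]
  have hkeys : (l'.foldl (fun d p => d.modify p.1 [] (fun l => l ++ [p.2])) PySem.Dict.empty).keys
      = PySem.Set.update [] (l'.map (fun p => p.1)) := by
    have := PySem.Dict.keys_foldl_modify_key l' (fun p => p.1) [] (fun _ p l => l ++ [p.2]) PySem.Dict.empty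
    simpa [PySem.Dict.keys_empty] using this
  have hun : diccionario.foldl (fun (us : List String) pi => PySem.Set.add us (pvUnidad pi.2)) []
      = PySem.Set.update [] (l'.map (fun p => p.1)) := by
    rw [hl', List.map_map]
    rw [PySem.Set.update_map_eq_foldl_add]
    rfl
  rw [hkeys, ← hun]
  apply List.map_congr_left
  intro u _
  congr 1
  rw [PySem.Dict.getD_foldl_modify_append]
  simp [hl', List.filter_map, Function.comp_def, List.map_map, PySem.Dict.getD_empty]

-- ===== VERDICT (by name: the statement is the Claim_ definition above) =====
theorem palabras_por_unidad_spec : Claim_equal_palabras_por_unidad := by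
  intro d _ _
  exact palabras_por_unidad_eq d
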